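-- pv_equiv track=rewrite | github.com/lbryio/lbry-sdk | lbrynet/lbrynet_console/ControlHandlers.py | get_shortcuts_for_options
-- ===== SOURCE A (Python) =====
-- def get_shortcuts_for_options(option_names):
--     shortcut_keys = []
--     names_with_shortcuts = []
--     for option_name in option_names:
--         name_with_shortcut = ''
--         found_shortcut = False
--         for c in option_name:
--             if not found_shortcut and not c.lower() in shortcut_keys:
--                 name_with_shortcut += '[' + c.lower() + ']'
--                 shortcut_keys.append(c.lower())
--                 found_shortcut = True
--             else:
--                 name_with_shortcut += c
--         if found_shortcut is False:
--             shortcut_keys.append("")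
--         names_with_shortcuts.append(name_with_shortcut)
--     return shortcut_keys, names_with_shortcuts
-- ===== SOURCE B (Python) =====
-- def get_shortcuts_for_options(option_names):
--     used = set()
--     shortcut_keys = []
--     names_with_shortcuts = []
--     for option_name in option_names:
--         idx = next((i for i, ch in enumerate(option_name) if ch.lower() not in used), None)
--         if idx is None:
--             shortcut_keys.append('')
--             names_with_shortcuts.append(option_name)
--         else:
--             c = option_name[idx].lower()
--             used.add(c)
--             shortcut_keys.append(c)
--             names_with_shortcuts.append(option_name[:idx] + '[' + c + ']' + option_name[idx + 1:])
--     return shortcut_keys, names_with_shortcuts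
-- ===== Notes on version B (the rewrite author's own statement) =====
-- stated objective: simpler
-- what changed: B splits A's single interleaved build-loop (incremental string building with a found flag, membership against the growing output list) into a per-name locate-then-assemble pass: find the first index whose lowercased char is not in a char set, then build the display string by slicing; the output list is no longer used for membership.
import Mathlib
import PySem

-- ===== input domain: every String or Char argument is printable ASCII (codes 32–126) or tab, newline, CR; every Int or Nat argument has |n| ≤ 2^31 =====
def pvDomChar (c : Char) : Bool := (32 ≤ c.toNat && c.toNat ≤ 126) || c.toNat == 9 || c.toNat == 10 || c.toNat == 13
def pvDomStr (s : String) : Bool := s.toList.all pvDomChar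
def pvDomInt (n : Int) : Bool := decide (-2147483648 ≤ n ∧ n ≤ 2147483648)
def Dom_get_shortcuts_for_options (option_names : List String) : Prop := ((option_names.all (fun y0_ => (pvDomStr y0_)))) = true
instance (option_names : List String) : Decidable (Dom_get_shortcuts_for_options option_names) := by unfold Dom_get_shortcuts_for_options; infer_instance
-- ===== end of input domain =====

-- B replaces A's interleaved build-loop (found flag + membership in the growing output list)
-- by a per-name locate-then-assemble pass over a character set; simpler decomposition, same values.

-- ===== PORT A =====
-- inner 'for c in option_name' loop: state = (name_with_shortcut as chars, found_shortcut, shortcut_keys)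
def pvGoA : List Char → List String → List Char → Bool → List Char × Bool × List String
  | [], keys, acc, found => (acc, found, keys)
  | c :: rest, keys, acc, found =>
    let lc := PySem.Chars.lowerChar c
    if !found && !(keys.contains (String.ofList [lc])) then
      pvGoA rest (keys ++ [String.ofList [lc]]) (acc ++ ['[', lc, ']']) true
    else
      pvGoA rest keys (acc ++ [c]) found

def pvLoopA : List String → List String → List String → List String × List String
  | [], keys, names => (keys, names)
  | n :: rest, keys, names =>
    let r := pvGoA n.toList keys [] false
    let keys' := if r.2.1 = false then r.2.2 ++ [""] else r.2.2
    pvLoopA rest keys' (names ++ [String.ofList r.1])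

def get_shortcuts_for_options (option_names : List String) : List String × List String :=
  pvLoopA option_names [] []

-- ===== PORT B =====
-- next((i for i, ch in enumerate(option_name) if ch.lower() not in used), None),
-- returned together with the lowered char found there
def pvFindFree (used : PySem.Set Char) : List Char → Option (Nat × Char)
  | [] => none
  | c :: rest =>
    let lc := PySem.Chars.lowerChar c
    if PySem.Set.contains used lc then
      match pvFindFree used rest with
      | none => none
      | some (i, d) => some (i + 1, d)
    else some (0, lc)

def pvLoopB : PySem.Set Char → List String → List String → List String → List String × List String
  | _, [], keys, names => (keys, names)
  | used, n :: rest, keys, names =>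
    match pvFindFree used n.toList with
    | none => pvLoopB used rest (keys ++ [""]) (names ++ [n])
    | some (i, c) =>
        pvLoopB (PySem.Set.add used c) rest (keys ++ [String.ofList [c]])
          (names ++ [String.ofList (n.toList.take i ++ ['[', c, ']'] ++ n.toList.drop (i + 1))])

def get_shortcuts_for_options_alt (option_names : List String) : List String × List String :=
  pvLoopB PySem.Set.empty option_names [] []

-- ===== PRECONDITION & SPEC =====
def Spec_get_shortcuts_for_options (option_names : List String) (out : List String × List String) : Prop := out = get_shortcuts_for_options_alt option_names
instance (option_names : List String) (out : List String × List String) : Decidable (Spec_get_shortcuts_for_options option_names out) := by unfold Spec_get_shortcuts_for_options; infer_instance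

-- ===== CLAIM (what is proved, stated in full; the proofs are below) =====
def Claim_equal_get_shortcuts_for_options : Prop := ∀ (option_names : List String), Dom_get_shortcuts_for_options option_names → Spec_get_shortcuts_for_options option_names (get_shortcuts_for_options option_names)

-- ===== LEMMAS AND PROOFS =====

-- invariant relating A's growing output list of keys to B's char set
def pvInv (keys : List String) (used : PySem.Set Char) : Prop :=
  ∀ ch : Char, String.ofList [ch] ∈ keys ↔ ch ∈ used

theorem pvGoA_found (chars : List Char) (keys : List String) (acc : List Char) :
    pvGoA chars keys acc true = (acc ++ chars, true, keys) := by
  induction chars generalizing acc with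
  | nil => simp [pvGoA]
  | cons c rest ih => simp [pvGoA, ih]

theorem pvGoA_none (chars : List Char) (keys : List String) (acc : List Char)
    (used : PySem.Set Char) (hinv : pvInv keys used)
    (h : pvFindFree used chars = none) :
    pvGoA chars keys acc false = (acc ++ chars, false, keys) := by
  induction chars generalizing acc with
  | nil => simp [pvGoA]
  | cons c rest ih =>
    simp only [pvFindFree] at h
    by_cases hc : PySem.Chars.lowerChar c ∈ used
    · simp only [if_pos (PySem.Set.contains_iff _ _ |>.mpr hc)] at h
      have h' : pvFindFree used rest = none := by
        cases hfr : pvFindFree used rest with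
        | none => rfl
        | some p => rw [hfr] at h; cases p; simp at h
      simp [pvGoA, (hinv _).mpr hc, ih _ h']
    · exfalso
      have : PySem.Set.contains used (PySem.Chars.lowerChar c) = false := by
        cases hb : PySem.Set.contains used (PySem.Chars.lowerChar c)
        · rfl
        · exact absurd ((PySem.Set.contains_iff _ _).mp hb) hc
      rw [this] at h
      simp at h

theorem pvGoA_some (chars : List Char) (keys : List String) (acc : List Char)
    (used : PySem.Set Char) (hinv : pvInv keys used)
    (i : Nat) (c : Char) (h : pvFindFree used chars = some (i, c)) :
    pvGoA chars keys acc false =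
      (acc ++ chars.take i ++ ['[', c, ']'] ++ chars.drop (i + 1), true,
       keys ++ [String.ofList [c]]) := by
  induction chars generalizing acc i with
  | nil => simp [pvFindFree] at h
  | cons d rest ih =>
    simp only [pvFindFree] at h
    by_cases hd : PySem.Chars.lowerChar d ∈ used
    · simp only [if_pos (PySem.Set.contains_iff _ _ |>.mpr hd)] at h
      cases hfr : pvFindFree used rest with
      | none => rw [hfr] at h; simp at h
      | some p =>
        obtain ⟨j, e⟩ := p
        rw [hfr] at h
        simp at h
        obtain ⟨hi, he⟩ := h
        subst hi he
        simp [pvGoA, (hinv _).mpr hd, ih _ _ hfr, List.take, List.drop]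
    · have hcf : PySem.Set.contains used (PySem.Chars.lowerChar d) = false := by
        cases hb : PySem.Set.contains used (PySem.Chars.lowerChar d)
        · rfl
        · exact absurd ((PySem.Set.contains_iff _ _).mp hb) hd
      rw [hcf] at h
      simp at h
      obtain ⟨hi, he⟩ := h
      subst hi
      subst he
      have hnm : String.ofList [PySem.Chars.lowerChar d] ∉ keys := fun hm => hd ((hinv _).mp hm)
      simp [pvGoA, hnm, pvGoA_found]

theorem pvOfListSingleton_ne_empty (a : Char) : String.ofList [a] ≠ "" := by
  intro h
  have : ([a] : List Char) = "".toList := String.ofList_inj.mp (by rw [h]; rfl)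
  simp at this

theorem pvLoop_eq (l : List String) (keys names : List String)
    (used : PySem.Set Char) (hinv : pvInv keys used) :
    pvLoopA l keys names = pvLoopB used l keys names := by
  induction l generalizing keys names used with
  | nil => simp [pvLoopA, pvLoopB]
  | cons n rest ih =>
    cases hf : pvFindFree used n.toList with
    | none =>
      have hg := pvGoA_none n.toList keys [] used hinv hf
      have hinv' : pvInv (keys ++ [""]) used := by
        intro ch
        simp [pvOfListSingleton_ne_empty ch, hinv ch]
      simp only [pvLoopA, pvLoopB, hf, hg]
      simpa using ih (keys ++ [""]) (names ++ [n]) used hinv'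
    | some p =>
      obtain ⟨i, c⟩ := p
      have hg := pvGoA_some n.toList keys [] used hinv i c hf
      have hinv' : pvInv (keys ++ [String.ofList [c]]) (PySem.Set.add used c) := by
        intro ch
        simp [PySem.Set.mem_add, String.ofList_inj, hinv ch]
      simp only [pvLoopA, pvLoopB, hf, hg]
      simpa using ih (keys ++ [String.ofList [c]]) _ (PySem.Set.add used c) hinv'

-- ===== VERDICT (by name: the statement is the Claim_ definition above) =====
theorem get_shortcuts_for_options_spec : Claim_equal_get_shortcuts_for_options := by
  intro option_names _
  unfold Spec_get_shortcuts_for_options get_shortcuts_for_options get_shortcuts_for_options_alt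
  exact pvLoop_eq option_names [] [] PySem.Set.empty (by intro ch; simp [PySem.Set.empty])
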